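-- pv_equiv track=rewrite | github.com/GreyLove/DataStructureAndAlgorithm | 44.py | digitAtIndex
-- ===== SOURCE A (Python) =====
-- def digitAtIndex(inputIndex):
--     if inputIndex<0:
--         return -1
--     if inputIndex<10:
--         return inputIndex
--
--     k = 1
--     base = 9
--     s = 9
--     while s<inputIndex:
--         k += 1
--         base *= 10
--         s += k*base
--
--     # k 位数
--     #开始的数
--     start = 10**(k-1)
--
--     p = 1
--     base = 9
--     s = 10
--     for _ in range(1,k-1):
--         p += 1
--         base *= 10
--         s += p*base
--
--     diff = inputIndex-s
--     chu = int(diff/k)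
--     yu = diff%k
--
--     start += chu
--     l = []
--     while start>0:
--         l.append(start%10)
--         start = int(start/10)
--
--     return l[k-1-yu]
-- ===== SOURCE B (Python) =====
-- def digitAtIndex(inputIndex):
--     if inputIndex < 0:
--         return -1
--     lo, hi = 0, inputIndex
--     while lo < hi:
--         mid = (lo + hi) // 2
--         if _total(mid) > inputIndex:
--             hi = mid
--         else:
--             lo = mid + 1
--     d = _dlen(lo)
--     offset = inputIndex - (_total(lo) - d)
--     return lo // 10 ** (d - 1 - offset) % 10
--
-- def _dlen(n):
--     d = 1
--     while 10 ** d <= n: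
--         d += 1
--     return d
--
-- def _total(n):
--     d = _dlen(n)
--     return (n + 1) * d - (10 ** d - 1) // 9 + 1
-- ===== Notes on version B (the rewrite author's own statement) =====
-- stated objective: alternative
-- what changed: B replaces A's linear scan over digit-length regions with a binary search over the number line using a closed-form cumulative-digit-count function, then extracts the digit arithmetically instead of building a reversed digit list.
import Mathlib
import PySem

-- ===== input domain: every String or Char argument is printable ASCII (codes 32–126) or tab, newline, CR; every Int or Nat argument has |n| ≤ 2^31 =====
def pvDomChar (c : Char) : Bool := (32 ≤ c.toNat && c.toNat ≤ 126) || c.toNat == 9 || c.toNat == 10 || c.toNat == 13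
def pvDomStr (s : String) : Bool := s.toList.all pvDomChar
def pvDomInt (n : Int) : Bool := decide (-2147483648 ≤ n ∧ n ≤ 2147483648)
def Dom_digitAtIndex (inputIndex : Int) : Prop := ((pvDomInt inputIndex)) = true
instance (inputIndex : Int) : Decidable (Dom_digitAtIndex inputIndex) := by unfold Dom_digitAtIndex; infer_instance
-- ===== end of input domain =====

-- B's change: a binary search over the number line with a closed-form cumulative digit count
-- replaces A's linear scan over digit-length regions, and the digit is extracted arithmetically
-- instead of via a reversed digit list (objective: alternative).

-- ===== PORT A =====
-- while s < inputIndex: k += 1; base *= 10; s += k*base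
-- (the positivity conjunct is only a totality guard; it holds on every reachable state)
def pvA_loop1 (inputIndex k base s : Int) : Int × Int × Int :=
  if s < inputIndex ∧ 0 < (k + 1) * (base * 10) then
    pvA_loop1 inputIndex (k + 1) (base * 10) (s + (k + 1) * (base * 10))
  else (k, base, s)
termination_by (inputIndex - s).toNat
decreasing_by omega

-- while start > 0: l.append(start % 10); start = int(start / 10)
-- int(start/10) is exact floor division here (start > 0, quotient below 2^53)
def pvA_digits (start : Int) (l : List Int) : List Int :=
  if 0 < start then
    pvA_digits (PySem.Int.floordiv start 10) (l ++ [PySem.Int.mod start 10])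
  else l
termination_by start.toNat
decreasing_by
  have := PySem.Int.floordiv_eq_ediv_of_pos (a := start) (b := 10) (by norm_num)
  omega

def digitAtIndex (inputIndex : Int) : Int :=
  if inputIndex < 0 then -1
  else if inputIndex < 10 then inputIndex
  else
    let k := (pvA_loop1 inputIndex 1 9 9).1
    let start := (10 : Int) ^ (k - 1).toNat      -- 10**(k-1); k ≥ 1 here
    -- for _ in range(1, k-1): p += 1; base *= 10; s += p*base   (state (p, base, s))
    let s := ((PySem.List.pyRange 1 (k - 1) 1).foldl
        (fun (st : Int × Int × Int) _ => (st.1 + 1, st.2.1 * 10, st.2.2 + (st.1 + 1) * (st.2.1 * 10)))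
        (1, 9, 10)).2.2
    let diff := inputIndex - s
    let chu := PySem.Int.floordiv diff k         -- int(diff/k): exact floor division here (diff ≥ 0, k ≤ 10)
    let yu := PySem.Int.mod diff k
    let l := pvA_digits (start + chu) []
    PySem.List.pyGetD l (k - 1 - yu) 0           -- l[k-1-yu]; in range on the admitted domain

-- ===== PORT B =====
-- _dlen: d = 1; while 10 ** d <= n: d += 1
-- (the positivity conjunct on d is only a totality guard; d ≥ 1 on every reachable state)
def pvDlen (n d : Int) : Int :=
  if 10 ^ d.toNat ≤ n ∧ 0 < d then pvDlen n (d + 1) else d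
termination_by (n + 1 - 10 ^ d.toNat).toNat
decreasing_by
  have h2 : (d + 1).toNat = d.toNat + 1 := by omega
  have h1 : (1 : Int) ≤ 10 ^ d.toNat := one_le_pow₀ (by norm_num)
  rw [h2, pow_succ]
  omega

-- _total(n) = (n + 1) * d - (10 ** d - 1) // 9 + 1 with d = _dlen(n)
def pvTotal (n : Int) : Int :=
  (n + 1) * pvDlen n 1 - PySem.Int.floordiv (10 ^ (pvDlen n 1).toNat - 1) 9 + 1

-- while lo < hi: mid = (lo + hi) // 2; if _total(mid) > inputIndex: hi = mid else: lo = mid + 1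
def pvB_search (lo hi i : Int) : Int :=
  if lo < hi then
    if i < pvTotal (PySem.Int.floordiv (lo + hi) 2) then
      pvB_search lo (PySem.Int.floordiv (lo + hi) 2) i
    else pvB_search (PySem.Int.floordiv (lo + hi) 2 + 1) hi i
  else lo
termination_by (hi - lo).toNat
decreasing_by
  all_goals
    have hm := PySem.Int.floordiv_eq_ediv_of_pos (a := lo + hi) (b := 2) (by norm_num)
    omega

def digitAtIndex_alt (inputIndex : Int) : Int :=
  if inputIndex < 0 then -1
  else
    let lo := pvB_search 0 inputIndex inputIndex
    let d := pvDlen lo 1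
    let offset := inputIndex - (pvTotal lo - d)
    PySem.Int.mod (PySem.Int.floordiv lo ((10 : Int) ^ (d - 1 - offset).toNat)) 10

-- ===== PRECONDITION & SPEC =====
def Spec_digitAtIndex (inputIndex : Int) (out : Int) : Prop := out = digitAtIndex_alt inputIndex
instance (inputIndex : Int) (out : Int) : Decidable (Spec_digitAtIndex inputIndex out) := by unfold Spec_digitAtIndex; infer_instance

-- ===== CLAIM (what is proved, stated in full; the proofs are below) =====
def Claim_equal_digitAtIndex : Prop := ∀ (inputIndex : Int), Dom_digitAtIndex inputIndex → Spec_digitAtIndex inputIndex (digitAtIndex inputIndex)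

-- ===== LEMMAS AND PROOFS =====

-- characterisation of pvDlen
lemma pvDlen_char (n d : Int) (hd : 0 < d) :
    d ≤ pvDlen n d ∧ n < 10 ^ (pvDlen n d).toNat ∧
      (pvDlen n d = d ∨ 10 ^ (pvDlen n d - 1).toNat ≤ n) := by
  fun_induction pvDlen n d with
  | case1 d hg ih =>
    have ih' := ih (by omega)
    refine ⟨by omega, ih'.2.1, Or.inr ?_⟩
    rcases ih'.2.2 with h | h
    · rw [h]; simpa using hg.1
    · exact h
  | case2 d hg =>
    by_cases hd0 : 10 ^ d.toNat ≤ n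
    · exact absurd ⟨hd0, hd⟩ hg
    · exact ⟨le_refl _, by omega, Or.inl rfl⟩

lemma pvDlen_eq (n d : Int) (hd : 0 < d) (_hn : 0 ≤ n)
    (hlo : 10 ^ (d - 1).toNat ≤ n) (hhi : n < 10 ^ d.toNat) : pvDlen n 1 = d := by
  obtain ⟨h1, h2, h3⟩ := pvDlen_char n 1 (by norm_num)
  set D := pvDlen n 1 with hD
  have hdD : (d - 1).toNat < D.toNat := by
    have := lt_of_le_of_lt hlo h2
    exact (pow_lt_pow_iff_right₀ (by norm_num : (1:Int) < 10)).mp this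
  have hDd : D ≤ d := by
    rcases h3 with h | h
    · omega
    · have := lt_of_le_of_lt h hhi
      have := (pow_lt_pow_iff_right₀ (by norm_num : (1:Int) < 10)).mp this
      omega
  omega

lemma pvRep (k : Nat) : ((10 : Int) ^ k - 1) % 9 = 0 := by
  induction k with
  | zero => decide
  | succ m ih => rw [pow_succ]; omega

lemma pvTotal_eq (n d : Int) (hd : 0 < d) (hn : 0 ≤ n)
    (hlo : 10 ^ (d - 1).toNat ≤ n) (hhi : n < 10 ^ d.toNat) :
    pvTotal n = (n + 1) * d - ((10 : Int) ^ d.toNat - 1) / 9 + 1 := by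
  unfold pvTotal
  rw [pvDlen_eq n d hd hn hlo hhi, PySem.Int.floordiv_eq_ediv_of_pos (by norm_num)]

lemma pvTotal_succ_lt (n d : Int) (hd : 1 ≤ d) (hn : 0 ≤ n)
    (hlo : 10 ^ (d - 1).toNat ≤ n) (hhi : n + 1 < 10 ^ d.toNat) :
    pvTotal n < pvTotal (n + 1) := by
  rw [pvTotal_eq n d (by omega) hn hlo (by omega),
    pvTotal_eq (n + 1) d (by omega) (by omega) (by omega) hhi]
  have hxy : (n + 1 + 1) * d = (n + 1) * d + d := by ring
  omega

lemma pvTotal_boundary_lt (n d : Int) (hd : 1 ≤ d) (hn : 0 ≤ n)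
    (heq : n + 1 = 10 ^ d.toNat) : pvTotal n < pvTotal (n + 1) := by
  have ht1 : (d + 1).toNat = d.toNat + 1 := by omega
  have hp1 : d.toNat = (d - 1).toNat + 1 := by omega
  have hpow : (10 : Int) ^ d.toNat = 10 ^ (d - 1).toNat * 10 := by rw [hp1, pow_succ]
  have hpow1 : (1 : Int) ≤ 10 ^ (d - 1).toNat := one_le_pow₀ (by norm_num)
  rw [pvTotal_eq n d (by omega) hn (by omega) (by omega),
    pvTotal_eq (n + 1) (d + 1) (by omega) (by omega)
      (by simp only [add_sub_cancel_right]; omega)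
      (by rw [ht1, pow_succ]; omega)]
  have h9a := pvRep d.toNat
  have h9b := pvRep (d + 1).toNat
  rw [ht1, pow_succ] at h9b ⊢
  have hxy : (n + 1 + 1) * (d + 1) = (n + 1) * d + n + d + 2 := by ring
  omega

lemma pvTotal_zero : pvTotal 0 = 1 := by
  unfold pvTotal
  rw [show pvDlen 0 1 = 1 from by rw [pvDlen]; norm_num,
    PySem.Int.floordiv_eq_ediv_of_pos (by norm_num)]
  norm_num

lemma pvTotal_succ_lt' (n : Int) (h0 : 0 ≤ n) (hb : n ≤ 2147483648) :
    pvTotal n < pvTotal (n + 1) := by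
  by_cases hz : n = 0
  · subst hz
    rw [pvTotal_zero, show (0:Int) + 1 = 1 from rfl,
      pvTotal_eq 1 1 (by norm_num) (by norm_num) (by norm_num) (by norm_num)]
    norm_num
  have hreg : (1 ≤ n ∧ n < 10) ∨ (10 ≤ n ∧ n < 100) ∨ (100 ≤ n ∧ n < 1000) ∨
      (1000 ≤ n ∧ n < 10000) ∨ (10000 ≤ n ∧ n < 100000) ∨ (100000 ≤ n ∧ n < 1000000) ∨
      (1000000 ≤ n ∧ n < 10000000) ∨ (10000000 ≤ n ∧ n < 100000000) ∨
      (100000000 ≤ n ∧ n < 1000000000) ∨ (1000000000 ≤ n ∧ n < 10000000000) := by omega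
  rcases hreg with ⟨h1, h2⟩|⟨h1, h2⟩|⟨h1, h2⟩|⟨h1, h2⟩|⟨h1, h2⟩|⟨h1, h2⟩|⟨h1, h2⟩|⟨h1, h2⟩|⟨h1, h2⟩|⟨h1, h2⟩
  · by_cases hb2 : n + 1 = 10
    · exact pvTotal_boundary_lt n 1 (by norm_num) h0 (by norm_num [Int.toNat]; omega)
    · exact pvTotal_succ_lt n 1 (by norm_num) h0 (by norm_num [Int.toNat]; omega) (by norm_num [Int.toNat]; omega)
  · by_cases hb2 : n + 1 = 100
    · exact pvTotal_boundary_lt n 2 (by norm_num) h0 (by norm_num [Int.toNat]; omega)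
    · exact pvTotal_succ_lt n 2 (by norm_num) h0 (by norm_num [Int.toNat]; omega) (by norm_num [Int.toNat]; omega)
  · by_cases hb2 : n + 1 = 1000
    · exact pvTotal_boundary_lt n 3 (by norm_num) h0 (by norm_num [Int.toNat]; omega)
    · exact pvTotal_succ_lt n 3 (by norm_num) h0 (by norm_num [Int.toNat]; omega) (by norm_num [Int.toNat]; omega)
  · by_cases hb2 : n + 1 = 10000
    · exact pvTotal_boundary_lt n 4 (by norm_num) h0 (by norm_num [Int.toNat]; omega)
    · exact pvTotal_succ_lt n 4 (by norm_num) h0 (by norm_num [Int.toNat]; omega) (by norm_num [Int.toNat]; omega)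
  · by_cases hb2 : n + 1 = 100000
    · exact pvTotal_boundary_lt n 5 (by norm_num) h0 (by norm_num [Int.toNat]; omega)
    · exact pvTotal_succ_lt n 5 (by norm_num) h0 (by norm_num [Int.toNat]; omega) (by norm_num [Int.toNat]; omega)
  · by_cases hb2 : n + 1 = 1000000
    · exact pvTotal_boundary_lt n 6 (by norm_num) h0 (by norm_num [Int.toNat]; omega)
    · exact pvTotal_succ_lt n 6 (by norm_num) h0 (by norm_num [Int.toNat]; omega) (by norm_num [Int.toNat]; omega)
  · by_cases hb2 : n + 1 = 10000000
    · exact pvTotal_boundary_lt n 7 (by norm_num) h0 (by norm_num [Int.toNat]; omega)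
    · exact pvTotal_succ_lt n 7 (by norm_num) h0 (by norm_num [Int.toNat]; omega) (by norm_num [Int.toNat]; omega)
  · by_cases hb2 : n + 1 = 100000000
    · exact pvTotal_boundary_lt n 8 (by norm_num) h0 (by norm_num [Int.toNat]; omega)
    · exact pvTotal_succ_lt n 8 (by norm_num) h0 (by norm_num [Int.toNat]; omega) (by norm_num [Int.toNat]; omega)
  · by_cases hb2 : n + 1 = 1000000000
    · exact pvTotal_boundary_lt n 9 (by norm_num) h0 (by norm_num [Int.toNat]; omega)
    · exact pvTotal_succ_lt n 9 (by norm_num) h0 (by norm_num [Int.toNat]; omega) (by norm_num [Int.toNat]; omega)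
  · exact pvTotal_succ_lt n 10 (by norm_num) h0 (by norm_num [Int.toNat]; omega) (by norm_num [Int.toNat]; omega)

-- monotonicity of pvTotal on the admitted domain
lemma pvTotal_mono (a b : Int) (ha : 0 ≤ a) (hab : a ≤ b) (hb : b ≤ 2147483648) :
    pvTotal a ≤ pvTotal b := by
  obtain ⟨k, hk⟩ : ∃ k : ℕ, b = a + k := ⟨(b - a).toNat, by omega⟩
  subst hk
  clear hab
  induction k with
  | zero => simp
  | succ m ih =>
    have hm : a + (m : Int) ≤ 2147483648 := by push_cast at hb ⊢; omega
    have step := pvTotal_succ_lt' (a + (m : Int)) (by omega) (by omega)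
    have hcast : a + ((m + 1 : ℕ) : Int) = a + (m : Int) + 1 := by push_cast; ring
    rw [hcast]
    exact le_trans (ih (by omega)) (le_of_lt step)

-- binary-search correctness
lemma pvB_search_eq (fuel : Nat) : ∀ lo hi i ans : Int, (hi - lo).toNat ≤ fuel →
    0 ≤ lo → lo ≤ ans → ans ≤ hi → hi ≤ i → i ≤ 2147483648 →
    i < pvTotal ans → (∀ m, 0 ≤ m → m < ans → pvTotal m ≤ i) →
    pvB_search lo hi i = ans := by
  induction fuel with
  | zero =>
    intro lo hi i ans h0 h1 h2 h3 h4 h5 h6 h7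
    rw [pvB_search, if_neg (by omega)]
    omega
  | succ f ih =>
    intro lo hi i ans h0 h1 h2 h3 h4 h5 h6 h7
    by_cases hlh : lo < hi
    · rw [pvB_search, if_pos hlh]
      have hmid := PySem.Int.floordiv_eq_ediv_of_pos (a := lo + hi) (b := 2) (by norm_num)
      set mid := PySem.Int.floordiv (lo + hi) 2 with hm
      have hm1 : lo ≤ mid := by omega
      have hm2 : mid < hi := by omega
      by_cases hc : i < pvTotal mid
      · rw [if_pos hc]
        have hansmid : ans ≤ mid := by
          by_contra hcon
          have := h7 mid (by omega) (by omega)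
          omega
        exact ih lo mid i ans (by omega) h1 h2 hansmid (by omega) h5 h6 h7
      · rw [if_neg hc]
        have hmidans : mid < ans := by
          by_contra hcon
          have := pvTotal_mono ans mid (by omega) (by omega) (by omega)
          omega
        exact ih (mid + 1) hi i ans (by omega) (by omega) (by omega) h3 h4 h5 h6 h7
    · rw [pvB_search, if_neg hlh]
      omega

-- digit extraction target shared by the per-region lemmas:
-- the (i-S)//d-th d-digit number's ((i-S) mod d)-th digit
def pvExtract (i S d P : Int) : Int :=
  PySem.Int.mod (PySem.Int.floordiv (P + (i - S) / d) ((10 : Int) ^ (d - 1 - (i - S) % d).toNat)) 10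

lemma pvTotal_small (m : Int) (h0 : 0 ≤ m) (h9 : m ≤ 9) : pvTotal m = m + 1 := by
  by_cases hm : m = 0
  · subst hm; exact pvTotal_zero
  · rw [pvTotal_eq m 1 (by norm_num) h0 (by norm_num [Int.toNat]; omega) (by norm_num [Int.toNat]; omega)]
    norm_num [Int.toNat]

lemma pvReg1 (i : Int) (h1 : 0 ≤ i) (h2 : i ≤ 9) : digitAtIndex_alt i = i := by
  have hiN : i < pvTotal i := by rw [pvTotal_small i h1 h2]; omega
  have hprev : ∀ m, 0 ≤ m → m < i → pvTotal m ≤ i := by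
    intro m hm0 hmi
    rw [pvTotal_small m hm0 (by omega)]
    omega
  have eB : pvB_search 0 i i = i :=
    pvB_search_eq i.toNat 0 i i i (by omega) (le_refl 0) h1 (le_refl i) (le_refl i) (by omega) hiN hprev
  have hdl : pvDlen i 1 = 1 := by
    rw [pvDlen, if_neg (by norm_num [Int.toNat]; omega)]
  unfold digitAtIndex_alt
  rw [if_neg (by omega)]
  simp only [eB, hdl, pvTotal_small i h1 h2]
  rw [show i - (i + 1 - 1) = 0 from by omega]
  norm_num [Int.toNat]
  omega

lemma pvRegB2 (i : Int) (h1 : 10 ≤ i) (h2 : i ≤ 189) :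
    digitAtIndex_alt i = pvExtract i 10 2 10 := by
  unfold digitAtIndex_alt pvExtract
  rw [if_neg (by omega)]
  set N : Int := 10 + (i - 10) / 2 with hN
  have hdN : pvDlen N 1 = 2 :=
    pvDlen_eq N 2 (by norm_num) (by omega) (by norm_num [Int.toNat]; omega) (by norm_num [Int.toNat]; omega)
  have htN : pvTotal N = (N + 1) * 2 - 11 + 1 := by
    rw [pvTotal_eq N 2 (by norm_num) (by omega) (by norm_num [Int.toNat]; omega) (by norm_num [Int.toNat]; omega)]
    norm_num [Int.toNat]
  have hiN : i < pvTotal N := by rw [htN]; omega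
  have hprev : ∀ m, 0 ≤ m → m < N → pvTotal m ≤ i := by
    intro m hm0 hmN
    have hle : pvTotal m ≤ pvTotal (N - 1) := pvTotal_mono m (N - 1) hm0 (by omega) (by omega)
    have hend : pvTotal (N - 1) ≤ i := by
      by_cases hq : (i - 10) / 2 = 0
      · rw [show N - 1 = (9 : Int) from by omega,
          pvTotal_eq 9 1 (by norm_num) (by norm_num) (by norm_num [Int.toNat]) (by norm_num [Int.toNat])]
        norm_num [Int.toNat]
        omega
      · rw [pvTotal_eq (N - 1) 2 (by norm_num) (by omega) (by norm_num [Int.toNat]; omega) (by norm_num [Int.toNat]; omega)]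
        norm_num [Int.toNat]
        omega
    omega
  have eB : pvB_search 0 i i = N :=
    pvB_search_eq i.toNat 0 i i N (by omega) (by omega) (by omega) (by omega) (le_refl i) (by omega) hiN hprev
  simp only [eB, hdN, htN]
  rw [show i - ((N + 1) * 2 - 11 + 1 - 2) = (i - 10) % 2 from by omega]

lemma pvRegA2 (i : Int) (h1 : 10 ≤ i) (h2 : i ≤ 189) :
    digitAtIndex i = pvExtract i 10 2 10 := by
  have hfd10 : ∀ a : Int, PySem.Int.floordiv a 10 = a / 10 := fun a => PySem.Int.floordiv_eq_ediv_of_pos (by norm_num)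
  have hmd10 : ∀ a : Int, PySem.Int.mod a 10 = a % 10 := fun a => PySem.Int.mod_eq_emod_of_pos (by norm_num)
  have e1 : pvA_loop1 i 1 9 9 = (2, 90, 189) := by
    rw [pvA_loop1, if_pos (by norm_num; omega)]; norm_num
    rw [pvA_loop1, if_neg (by norm_num; omega)]
  unfold digitAtIndex pvExtract
  simp only [if_neg (show ¬ i < 0 by omega), if_neg (show ¬ i < 10 by omega), e1]
  norm_num [show Int.toNat 1 = 1 from rfl]
  rw [pvA_digits, if_pos (by omega)]; simp only [hfd10, hmd10]
  rw [pvA_digits, if_pos (by omega)]; simp only [hfd10, hmd10]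
  rw [pvA_digits, if_neg (by omega)]
  simp only [List.nil_append, List.cons_append]
  have hr : (i - 10) % 2 = 0 ∨ (i - 10) % 2 = 1 := by omega
  rcases hr with h|h <;> rw [h] <;>
    norm_num [PySem.List.pyGetD_ofNat', Int.toNat, hfd10, hmd10] <;> omega

lemma pvRegB3 (i : Int) (h1 : 190 ≤ i) (h2 : i ≤ 2889) :
    digitAtIndex_alt i = pvExtract i 190 3 100 := by
  unfold digitAtIndex_alt pvExtract
  rw [if_neg (by omega)]
  set N : Int := 100 + (i - 190) / 3 with hN
  have hdN : pvDlen N 1 = 3 :=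
    pvDlen_eq N 3 (by norm_num) (by omega) (by norm_num [Int.toNat]; omega) (by norm_num [Int.toNat]; omega)
  have htN : pvTotal N = (N + 1) * 3 - 111 + 1 := by
    rw [pvTotal_eq N 3 (by norm_num) (by omega) (by norm_num [Int.toNat]; omega) (by norm_num [Int.toNat]; omega)]
    norm_num [Int.toNat]
  have hiN : i < pvTotal N := by rw [htN]; omega
  have hprev : ∀ m, 0 ≤ m → m < N → pvTotal m ≤ i := by
    intro m hm0 hmN
    have hle : pvTotal m ≤ pvTotal (N - 1) := pvTotal_mono m (N - 1) hm0 (by omega) (by omega)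
    have hend : pvTotal (N - 1) ≤ i := by
      by_cases hq : (i - 190) / 3 = 0
      · rw [show N - 1 = (99 : Int) from by omega,
          pvTotal_eq 99 2 (by norm_num) (by norm_num) (by norm_num [Int.toNat]) (by norm_num [Int.toNat])]
        norm_num [Int.toNat]
        omega
      · rw [pvTotal_eq (N - 1) 3 (by norm_num) (by omega) (by norm_num [Int.toNat]; omega) (by norm_num [Int.toNat]; omega)]
        norm_num [Int.toNat]
        omega
    omega
  have eB : pvB_search 0 i i = N :=
    pvB_search_eq i.toNat 0 i i N (by omega) (by omega) (by omega) (by omega) (le_refl i) (by omega) hiN hprev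
  simp only [eB, hdN, htN]
  rw [show i - ((N + 1) * 3 - 111 + 1 - 3) = (i - 190) % 3 from by omega]

lemma pvRegA3 (i : Int) (h1 : 190 ≤ i) (h2 : i ≤ 2889) :
    digitAtIndex i = pvExtract i 190 3 100 := by
  have hfd10 : ∀ a : Int, PySem.Int.floordiv a 10 = a / 10 := fun a => PySem.Int.floordiv_eq_ediv_of_pos (by norm_num)
  have hmd10 : ∀ a : Int, PySem.Int.mod a 10 = a % 10 := fun a => PySem.Int.mod_eq_emod_of_pos (by norm_num)
  have e1 : pvA_loop1 i 1 9 9 = (3, 900, 2889) := by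
    rw [pvA_loop1, if_pos (by norm_num; omega)]; norm_num
    rw [pvA_loop1, if_pos (by norm_num; omega)]; norm_num
    rw [pvA_loop1, if_neg (by norm_num; omega)]
  have e2 : ((PySem.List.pyRange 1 2 1).foldl
      (fun (st : Int × Int × Int) _ => (st.1 + 1, st.2.1 * 10, st.2.2 + (st.1 + 1) * (st.2.1 * 10)))
      (1, 9, 10)).2.2 = 190 := by decide
  unfold digitAtIndex pvExtract
  simp only [if_neg (show ¬ i < 0 by omega), if_neg (show ¬ i < 10 by omega), e1]
  norm_num [show Int.toNat 2 = 2 from rfl]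
  simp only [e2]
  rw [pvA_digits, if_pos (by omega)]; simp only [hfd10, hmd10]
  rw [pvA_digits, if_pos (by omega)]; simp only [hfd10, hmd10]
  rw [pvA_digits, if_pos (by omega)]; simp only [hfd10, hmd10]
  rw [pvA_digits, if_neg (by omega)]
  simp only [List.nil_append, List.cons_append]
  have hr : (i - 190) % 3 = 0 ∨ (i - 190) % 3 = 1 ∨ (i - 190) % 3 = 2 := by omega
  rcases hr with h|h|h <;> rw [h] <;>
    norm_num [PySem.List.pyGetD_ofNat', Int.toNat, hfd10, hmd10] <;> omega

lemma pvRegB4 (i : Int) (h1 : 2890 ≤ i) (h2 : i ≤ 38889) :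
    digitAtIndex_alt i = pvExtract i 2890 4 1000 := by
  unfold digitAtIndex_alt pvExtract
  rw [if_neg (by omega)]
  set N : Int := 1000 + (i - 2890) / 4 with hN
  have hdN : pvDlen N 1 = 4 :=
    pvDlen_eq N 4 (by norm_num) (by omega) (by norm_num [Int.toNat]; omega) (by norm_num [Int.toNat]; omega)
  have htN : pvTotal N = (N + 1) * 4 - 1111 + 1 := by
    rw [pvTotal_eq N 4 (by norm_num) (by omega) (by norm_num [Int.toNat]; omega) (by norm_num [Int.toNat]; omega)]
    norm_num [Int.toNat]
  have hiN : i < pvTotal N := by rw [htN]; omega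
  have hprev : ∀ m, 0 ≤ m → m < N → pvTotal m ≤ i := by
    intro m hm0 hmN
    have hle : pvTotal m ≤ pvTotal (N - 1) := pvTotal_mono m (N - 1) hm0 (by omega) (by omega)
    have hend : pvTotal (N - 1) ≤ i := by
      by_cases hq : (i - 2890) / 4 = 0
      · rw [show N - 1 = (999 : Int) from by omega,
          pvTotal_eq 999 3 (by norm_num) (by norm_num) (by norm_num [Int.toNat]) (by norm_num [Int.toNat])]
        norm_num [Int.toNat]
        omega
      · rw [pvTotal_eq (N - 1) 4 (by norm_num) (by omega) (by norm_num [Int.toNat]; omega) (by norm_num [Int.toNat]; omega)]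
        norm_num [Int.toNat]
        omega
    omega
  have eB : pvB_search 0 i i = N :=
    pvB_search_eq i.toNat 0 i i N (by omega) (by omega) (by omega) (by omega) (le_refl i) (by omega) hiN hprev
  simp only [eB, hdN, htN]
  rw [show i - ((N + 1) * 4 - 1111 + 1 - 4) = (i - 2890) % 4 from by omega]

lemma pvRegA4 (i : Int) (h1 : 2890 ≤ i) (h2 : i ≤ 38889) :
    digitAtIndex i = pvExtract i 2890 4 1000 := by
  have hfd10 : ∀ a : Int, PySem.Int.floordiv a 10 = a / 10 := fun a => PySem.Int.floordiv_eq_ediv_of_pos (by norm_num)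
  have hmd10 : ∀ a : Int, PySem.Int.mod a 10 = a % 10 := fun a => PySem.Int.mod_eq_emod_of_pos (by norm_num)
  have e1 : pvA_loop1 i 1 9 9 = (4, 9000, 38889) := by
    rw [pvA_loop1, if_pos (by norm_num; omega)]; norm_num
    rw [pvA_loop1, if_pos (by norm_num; omega)]; norm_num
    rw [pvA_loop1, if_pos (by norm_num; omega)]; norm_num
    rw [pvA_loop1, if_neg (by norm_num; omega)]
  have e2 : ((PySem.List.pyRange 1 3 1).foldl
      (fun (st : Int × Int × Int) _ => (st.1 + 1, st.2.1 * 10, st.2.2 + (st.1 + 1) * (st.2.1 * 10)))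
      (1, 9, 10)).2.2 = 2890 := by decide
  unfold digitAtIndex pvExtract
  simp only [if_neg (show ¬ i < 0 by omega), if_neg (show ¬ i < 10 by omega), e1]
  norm_num [show Int.toNat 3 = 3 from rfl]
  simp only [e2]
  rw [pvA_digits, if_pos (by omega)]; simp only [hfd10, hmd10]
  rw [pvA_digits, if_pos (by omega)]; simp only [hfd10, hmd10]
  rw [pvA_digits, if_pos (by omega)]; simp only [hfd10, hmd10]
  rw [pvA_digits, if_pos (by omega)]; simp only [hfd10, hmd10]
  rw [pvA_digits, if_neg (by omega)]
  simp only [List.nil_append, List.cons_append]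
  have hr : (i - 2890) % 4 = 0 ∨ (i - 2890) % 4 = 1 ∨ (i - 2890) % 4 = 2 ∨ (i - 2890) % 4 = 3 := by omega
  rcases hr with h|h|h|h <;> rw [h] <;>
    norm_num [PySem.List.pyGetD_ofNat', Int.toNat, hfd10, hmd10] <;> omega

lemma pvRegB5 (i : Int) (h1 : 38890 ≤ i) (h2 : i ≤ 488889) :
    digitAtIndex_alt i = pvExtract i 38890 5 10000 := by
  unfold digitAtIndex_alt pvExtract
  rw [if_neg (by omega)]
  set N : Int := 10000 + (i - 38890) / 5 with hN
  have hdN : pvDlen N 1 = 5 :=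
    pvDlen_eq N 5 (by norm_num) (by omega) (by norm_num [Int.toNat]; omega) (by norm_num [Int.toNat]; omega)
  have htN : pvTotal N = (N + 1) * 5 - 11111 + 1 := by
    rw [pvTotal_eq N 5 (by norm_num) (by omega) (by norm_num [Int.toNat]; omega) (by norm_num [Int.toNat]; omega)]
    norm_num [Int.toNat]
  have hiN : i < pvTotal N := by rw [htN]; omega
  have hprev : ∀ m, 0 ≤ m → m < N → pvTotal m ≤ i := by
    intro m hm0 hmN
    have hle : pvTotal m ≤ pvTotal (N - 1) := pvTotal_mono m (N - 1) hm0 (by omega) (by omega)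
    have hend : pvTotal (N - 1) ≤ i := by
      by_cases hq : (i - 38890) / 5 = 0
      · rw [show N - 1 = (9999 : Int) from by omega,
          pvTotal_eq 9999 4 (by norm_num) (by norm_num) (by norm_num [Int.toNat]) (by norm_num [Int.toNat])]
        norm_num [Int.toNat]
        omega
      · rw [pvTotal_eq (N - 1) 5 (by norm_num) (by omega) (by norm_num [Int.toNat]; omega) (by norm_num [Int.toNat]; omega)]
        norm_num [Int.toNat]
        omega
    omega
  have eB : pvB_search 0 i i = N :=
    pvB_search_eq i.toNat 0 i i N (by omega) (by omega) (by omega) (by omega) (le_refl i) (by omega) hiN hprev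
  simp only [eB, hdN, htN]
  rw [show i - ((N + 1) * 5 - 11111 + 1 - 5) = (i - 38890) % 5 from by omega]

lemma pvRegA5 (i : Int) (h1 : 38890 ≤ i) (h2 : i ≤ 488889) :
    digitAtIndex i = pvExtract i 38890 5 10000 := by
  have hfd10 : ∀ a : Int, PySem.Int.floordiv a 10 = a / 10 := fun a => PySem.Int.floordiv_eq_ediv_of_pos (by norm_num)
  have hmd10 : ∀ a : Int, PySem.Int.mod a 10 = a % 10 := fun a => PySem.Int.mod_eq_emod_of_pos (by norm_num)
  have e1 : pvA_loop1 i 1 9 9 = (5, 90000, 488889) := by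
    rw [pvA_loop1, if_pos (by norm_num; omega)]; norm_num
    rw [pvA_loop1, if_pos (by norm_num; omega)]; norm_num
    rw [pvA_loop1, if_pos (by norm_num; omega)]; norm_num
    rw [pvA_loop1, if_pos (by norm_num; omega)]; norm_num
    rw [pvA_loop1, if_neg (by norm_num; omega)]
  have e2 : ((PySem.List.pyRange 1 4 1).foldl
      (fun (st : Int × Int × Int) _ => (st.1 + 1, st.2.1 * 10, st.2.2 + (st.1 + 1) * (st.2.1 * 10)))
      (1, 9, 10)).2.2 = 38890 := by decide
  unfold digitAtIndex pvExtract
  simp only [if_neg (show ¬ i < 0 by omega), if_neg (show ¬ i < 10 by omega), e1]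
  norm_num [show Int.toNat 4 = 4 from rfl]
  simp only [e2]
  rw [pvA_digits, if_pos (by omega)]; simp only [hfd10, hmd10]
  rw [pvA_digits, if_pos (by omega)]; simp only [hfd10, hmd10]
  rw [pvA_digits, if_pos (by omega)]; simp only [hfd10, hmd10]
  rw [pvA_digits, if_pos (by omega)]; simp only [hfd10, hmd10]
  rw [pvA_digits, if_pos (by omega)]; simp only [hfd10, hmd10]
  rw [pvA_digits, if_neg (by omega)]
  simp only [List.nil_append, List.cons_append]
  have hr : (i - 38890) % 5 = 0 ∨ (i - 38890) % 5 = 1 ∨ (i - 38890) % 5 = 2 ∨ (i - 38890) % 5 = 3 ∨ (i - 38890) % 5 = 4 := by omega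
  rcases hr with h|h|h|h|h <;> rw [h] <;>
    norm_num [PySem.List.pyGetD_ofNat', Int.toNat, hfd10, hmd10] <;> omega

lemma pvRegB6 (i : Int) (h1 : 488890 ≤ i) (h2 : i ≤ 5888889) :
    digitAtIndex_alt i = pvExtract i 488890 6 100000 := by
  unfold digitAtIndex_alt pvExtract
  rw [if_neg (by omega)]
  set N : Int := 100000 + (i - 488890) / 6 with hN
  have hdN : pvDlen N 1 = 6 :=
    pvDlen_eq N 6 (by norm_num) (by omega) (by norm_num [Int.toNat]; omega) (by norm_num [Int.toNat]; omega)
  have htN : pvTotal N = (N + 1) * 6 - 111111 + 1 := by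
    rw [pvTotal_eq N 6 (by norm_num) (by omega) (by norm_num [Int.toNat]; omega) (by norm_num [Int.toNat]; omega)]
    norm_num [Int.toNat]
  have hiN : i < pvTotal N := by rw [htN]; omega
  have hprev : ∀ m, 0 ≤ m → m < N → pvTotal m ≤ i := by
    intro m hm0 hmN
    have hle : pvTotal m ≤ pvTotal (N - 1) := pvTotal_mono m (N - 1) hm0 (by omega) (by omega)
    have hend : pvTotal (N - 1) ≤ i := by
      by_cases hq : (i - 488890) / 6 = 0
      · rw [show N - 1 = (99999 : Int) from by omega,
          pvTotal_eq 99999 5 (by norm_num) (by norm_num) (by norm_num [Int.toNat]) (by norm_num [Int.toNat])]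
        norm_num [Int.toNat]
        omega
      · rw [pvTotal_eq (N - 1) 6 (by norm_num) (by omega) (by norm_num [Int.toNat]; omega) (by norm_num [Int.toNat]; omega)]
        norm_num [Int.toNat]
        omega
    omega
  have eB : pvB_search 0 i i = N :=
    pvB_search_eq i.toNat 0 i i N (by omega) (by omega) (by omega) (by omega) (le_refl i) (by omega) hiN hprev
  simp only [eB, hdN, htN]
  rw [show i - ((N + 1) * 6 - 111111 + 1 - 6) = (i - 488890) % 6 from by omega]

lemma pvRegA6 (i : Int) (h1 : 488890 ≤ i) (h2 : i ≤ 5888889) :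
    digitAtIndex i = pvExtract i 488890 6 100000 := by
  have hfd10 : ∀ a : Int, PySem.Int.floordiv a 10 = a / 10 := fun a => PySem.Int.floordiv_eq_ediv_of_pos (by norm_num)
  have hmd10 : ∀ a : Int, PySem.Int.mod a 10 = a % 10 := fun a => PySem.Int.mod_eq_emod_of_pos (by norm_num)
  have e1 : pvA_loop1 i 1 9 9 = (6, 900000, 5888889) := by
    rw [pvA_loop1, if_pos (by norm_num; omega)]; norm_num
    rw [pvA_loop1, if_pos (by norm_num; omega)]; norm_num
    rw [pvA_loop1, if_pos (by norm_num; omega)]; norm_num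
    rw [pvA_loop1, if_pos (by norm_num; omega)]; norm_num
    rw [pvA_loop1, if_pos (by norm_num; omega)]; norm_num
    rw [pvA_loop1, if_neg (by norm_num; omega)]
  have e2 : ((PySem.List.pyRange 1 5 1).foldl
      (fun (st : Int × Int × Int) _ => (st.1 + 1, st.2.1 * 10, st.2.2 + (st.1 + 1) * (st.2.1 * 10)))
      (1, 9, 10)).2.2 = 488890 := by decide
  unfold digitAtIndex pvExtract
  simp only [if_neg (show ¬ i < 0 by omega), if_neg (show ¬ i < 10 by omega), e1]
  norm_num [show Int.toNat 5 = 5 from rfl]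
  simp only [e2]
  rw [pvA_digits, if_pos (by omega)]; simp only [hfd10, hmd10]
  rw [pvA_digits, if_pos (by omega)]; simp only [hfd10, hmd10]
  rw [pvA_digits, if_pos (by omega)]; simp only [hfd10, hmd10]
  rw [pvA_digits, if_pos (by omega)]; simp only [hfd10, hmd10]
  rw [pvA_digits, if_pos (by omega)]; simp only [hfd10, hmd10]
  rw [pvA_digits, if_pos (by omega)]; simp only [hfd10, hmd10]
  rw [pvA_digits, if_neg (by omega)]
  simp only [List.nil_append, List.cons_append]
  have hr : (i - 488890) % 6 = 0 ∨ (i - 488890) % 6 = 1 ∨ (i - 488890) % 6 = 2 ∨ (i - 488890) % 6 = 3 ∨ (i - 488890) % 6 = 4 ∨ (i - 488890) % 6 = 5 := by omega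
  rcases hr with h|h|h|h|h|h <;> rw [h] <;>
    norm_num [PySem.List.pyGetD_ofNat', Int.toNat, hfd10, hmd10] <;> omega

lemma pvRegB7 (i : Int) (h1 : 5888890 ≤ i) (h2 : i ≤ 68888889) :
    digitAtIndex_alt i = pvExtract i 5888890 7 1000000 := by
  unfold digitAtIndex_alt pvExtract
  rw [if_neg (by omega)]
  set N : Int := 1000000 + (i - 5888890) / 7 with hN
  have hdN : pvDlen N 1 = 7 :=
    pvDlen_eq N 7 (by norm_num) (by omega) (by norm_num [Int.toNat]; omega) (by norm_num [Int.toNat]; omega)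
  have htN : pvTotal N = (N + 1) * 7 - 1111111 + 1 := by
    rw [pvTotal_eq N 7 (by norm_num) (by omega) (by norm_num [Int.toNat]; omega) (by norm_num [Int.toNat]; omega)]
    norm_num [Int.toNat]
  have hiN : i < pvTotal N := by rw [htN]; omega
  have hprev : ∀ m, 0 ≤ m → m < N → pvTotal m ≤ i := by
    intro m hm0 hmN
    have hle : pvTotal m ≤ pvTotal (N - 1) := pvTotal_mono m (N - 1) hm0 (by omega) (by omega)
    have hend : pvTotal (N - 1) ≤ i := by
      by_cases hq : (i - 5888890) / 7 = 0
      · rw [show N - 1 = (999999 : Int) from by omega,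
          pvTotal_eq 999999 6 (by norm_num) (by norm_num) (by norm_num [Int.toNat]) (by norm_num [Int.toNat])]
        norm_num [Int.toNat]
        omega
      · rw [pvTotal_eq (N - 1) 7 (by norm_num) (by omega) (by norm_num [Int.toNat]; omega) (by norm_num [Int.toNat]; omega)]
        norm_num [Int.toNat]
        omega
    omega
  have eB : pvB_search 0 i i = N :=
    pvB_search_eq i.toNat 0 i i N (by omega) (by omega) (by omega) (by omega) (le_refl i) (by omega) hiN hprev
  simp only [eB, hdN, htN]
  rw [show i - ((N + 1) * 7 - 1111111 + 1 - 7) = (i - 5888890) % 7 from by omega]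

lemma pvRegA7 (i : Int) (h1 : 5888890 ≤ i) (h2 : i ≤ 68888889) :
    digitAtIndex i = pvExtract i 5888890 7 1000000 := by
  have hfd10 : ∀ a : Int, PySem.Int.floordiv a 10 = a / 10 := fun a => PySem.Int.floordiv_eq_ediv_of_pos (by norm_num)
  have hmd10 : ∀ a : Int, PySem.Int.mod a 10 = a % 10 := fun a => PySem.Int.mod_eq_emod_of_pos (by norm_num)
  have e1 : pvA_loop1 i 1 9 9 = (7, 9000000, 68888889) := by
    rw [pvA_loop1, if_pos (by norm_num; omega)]; norm_num
    rw [pvA_loop1, if_pos (by norm_num; omega)]; norm_num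
    rw [pvA_loop1, if_pos (by norm_num; omega)]; norm_num
    rw [pvA_loop1, if_pos (by norm_num; omega)]; norm_num
    rw [pvA_loop1, if_pos (by norm_num; omega)]; norm_num
    rw [pvA_loop1, if_pos (by norm_num; omega)]; norm_num
    rw [pvA_loop1, if_neg (by norm_num; omega)]
  have e2 : ((PySem.List.pyRange 1 6 1).foldl
      (fun (st : Int × Int × Int) _ => (st.1 + 1, st.2.1 * 10, st.2.2 + (st.1 + 1) * (st.2.1 * 10)))
      (1, 9, 10)).2.2 = 5888890 := by decide
  unfold digitAtIndex pvExtract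
  simp only [if_neg (show ¬ i < 0 by omega), if_neg (show ¬ i < 10 by omega), e1]
  norm_num [show Int.toNat 6 = 6 from rfl]
  simp only [e2]
  rw [pvA_digits, if_pos (by omega)]; simp only [hfd10, hmd10]
  rw [pvA_digits, if_pos (by omega)]; simp only [hfd10, hmd10]
  rw [pvA_digits, if_pos (by omega)]; simp only [hfd10, hmd10]
  rw [pvA_digits, if_pos (by omega)]; simp only [hfd10, hmd10]
  rw [pvA_digits, if_pos (by omega)]; simp only [hfd10, hmd10]
  rw [pvA_digits, if_pos (by omega)]; simp only [hfd10, hmd10]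
  rw [pvA_digits, if_pos (by omega)]; simp only [hfd10, hmd10]
  rw [pvA_digits, if_neg (by omega)]
  simp only [List.nil_append, List.cons_append]
  have hr : (i - 5888890) % 7 = 0 ∨ (i - 5888890) % 7 = 1 ∨ (i - 5888890) % 7 = 2 ∨ (i - 5888890) % 7 = 3 ∨ (i - 5888890) % 7 = 4 ∨ (i - 5888890) % 7 = 5 ∨ (i - 5888890) % 7 = 6 := by omega
  rcases hr with h|h|h|h|h|h|h <;> rw [h] <;>
    norm_num [PySem.List.pyGetD_ofNat', Int.toNat, hfd10, hmd10] <;> omega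

lemma pvRegB8 (i : Int) (h1 : 68888890 ≤ i) (h2 : i ≤ 788888889) :
    digitAtIndex_alt i = pvExtract i 68888890 8 10000000 := by
  unfold digitAtIndex_alt pvExtract
  rw [if_neg (by omega)]
  set N : Int := 10000000 + (i - 68888890) / 8 with hN
  have hdN : pvDlen N 1 = 8 :=
    pvDlen_eq N 8 (by norm_num) (by omega) (by norm_num [Int.toNat]; omega) (by norm_num [Int.toNat]; omega)
  have htN : pvTotal N = (N + 1) * 8 - 11111111 + 1 := by
    rw [pvTotal_eq N 8 (by norm_num) (by omega) (by norm_num [Int.toNat]; omega) (by norm_num [Int.toNat]; omega)]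
    norm_num [Int.toNat]
  have hiN : i < pvTotal N := by rw [htN]; omega
  have hprev : ∀ m, 0 ≤ m → m < N → pvTotal m ≤ i := by
    intro m hm0 hmN
    have hle : pvTotal m ≤ pvTotal (N - 1) := pvTotal_mono m (N - 1) hm0 (by omega) (by omega)
    have hend : pvTotal (N - 1) ≤ i := by
      by_cases hq : (i - 68888890) / 8 = 0
      · rw [show N - 1 = (9999999 : Int) from by omega,
          pvTotal_eq 9999999 7 (by norm_num) (by norm_num) (by norm_num [Int.toNat]) (by norm_num [Int.toNat])]
        norm_num [Int.toNat]
        omega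
      · rw [pvTotal_eq (N - 1) 8 (by norm_num) (by omega) (by norm_num [Int.toNat]; omega) (by norm_num [Int.toNat]; omega)]
        norm_num [Int.toNat]
        omega
    omega
  have eB : pvB_search 0 i i = N :=
    pvB_search_eq i.toNat 0 i i N (by omega) (by omega) (by omega) (by omega) (le_refl i) (by omega) hiN hprev
  simp only [eB, hdN, htN]
  rw [show i - ((N + 1) * 8 - 11111111 + 1 - 8) = (i - 68888890) % 8 from by omega]

lemma pvRegA8 (i : Int) (h1 : 68888890 ≤ i) (h2 : i ≤ 788888889) :
    digitAtIndex i = pvExtract i 68888890 8 10000000 := by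
  have hfd10 : ∀ a : Int, PySem.Int.floordiv a 10 = a / 10 := fun a => PySem.Int.floordiv_eq_ediv_of_pos (by norm_num)
  have hmd10 : ∀ a : Int, PySem.Int.mod a 10 = a % 10 := fun a => PySem.Int.mod_eq_emod_of_pos (by norm_num)
  have e1 : pvA_loop1 i 1 9 9 = (8, 90000000, 788888889) := by
    rw [pvA_loop1, if_pos (by norm_num; omega)]; norm_num
    rw [pvA_loop1, if_pos (by norm_num; omega)]; norm_num
    rw [pvA_loop1, if_pos (by norm_num; omega)]; norm_num
    rw [pvA_loop1, if_pos (by norm_num; omega)]; norm_num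
    rw [pvA_loop1, if_pos (by norm_num; omega)]; norm_num
    rw [pvA_loop1, if_pos (by norm_num; omega)]; norm_num
    rw [pvA_loop1, if_pos (by norm_num; omega)]; norm_num
    rw [pvA_loop1, if_neg (by norm_num; omega)]
  have e2 : ((PySem.List.pyRange 1 7 1).foldl
      (fun (st : Int × Int × Int) _ => (st.1 + 1, st.2.1 * 10, st.2.2 + (st.1 + 1) * (st.2.1 * 10)))
      (1, 9, 10)).2.2 = 68888890 := by decide
  unfold digitAtIndex pvExtract
  simp only [if_neg (show ¬ i < 0 by omega), if_neg (show ¬ i < 10 by omega), e1]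
  norm_num [show Int.toNat 7 = 7 from rfl]
  simp only [e2]
  rw [pvA_digits, if_pos (by omega)]; simp only [hfd10, hmd10]
  rw [pvA_digits, if_pos (by omega)]; simp only [hfd10, hmd10]
  rw [pvA_digits, if_pos (by omega)]; simp only [hfd10, hmd10]
  rw [pvA_digits, if_pos (by omega)]; simp only [hfd10, hmd10]
  rw [pvA_digits, if_pos (by omega)]; simp only [hfd10, hmd10]
  rw [pvA_digits, if_pos (by omega)]; simp only [hfd10, hmd10]
  rw [pvA_digits, if_pos (by omega)]; simp only [hfd10, hmd10]
  rw [pvA_digits, if_pos (by omega)]; simp only [hfd10, hmd10]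
  rw [pvA_digits, if_neg (by omega)]
  simp only [List.nil_append, List.cons_append]
  have hr : (i - 68888890) % 8 = 0 ∨ (i - 68888890) % 8 = 1 ∨ (i - 68888890) % 8 = 2 ∨ (i - 68888890) % 8 = 3 ∨ (i - 68888890) % 8 = 4 ∨ (i - 68888890) % 8 = 5 ∨ (i - 68888890) % 8 = 6 ∨ (i - 68888890) % 8 = 7 := by omega
  rcases hr with h|h|h|h|h|h|h|h <;> rw [h] <;>
    norm_num [PySem.List.pyGetD_ofNat', Int.toNat, hfd10, hmd10] <;> omega

lemma pvRegB9 (i : Int) (h1 : 788888890 ≤ i) (h2 : i ≤ 2147483648) :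
    digitAtIndex_alt i = pvExtract i 788888890 9 100000000 := by
  unfold digitAtIndex_alt pvExtract
  rw [if_neg (by omega)]
  set N : Int := 100000000 + (i - 788888890) / 9 with hN
  have hdN : pvDlen N 1 = 9 :=
    pvDlen_eq N 9 (by norm_num) (by omega) (by norm_num [Int.toNat]; omega) (by norm_num [Int.toNat]; omega)
  have htN : pvTotal N = (N + 1) * 9 - 111111111 + 1 := by
    rw [pvTotal_eq N 9 (by norm_num) (by omega) (by norm_num [Int.toNat]; omega) (by norm_num [Int.toNat]; omega)]
    norm_num [Int.toNat]
  have hiN : i < pvTotal N := by rw [htN]; omega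
  have hprev : ∀ m, 0 ≤ m → m < N → pvTotal m ≤ i := by
    intro m hm0 hmN
    have hle : pvTotal m ≤ pvTotal (N - 1) := pvTotal_mono m (N - 1) hm0 (by omega) (by omega)
    have hend : pvTotal (N - 1) ≤ i := by
      by_cases hq : (i - 788888890) / 9 = 0
      · rw [show N - 1 = (99999999 : Int) from by omega,
          pvTotal_eq 99999999 8 (by norm_num) (by norm_num) (by norm_num [Int.toNat]) (by norm_num [Int.toNat])]
        norm_num [Int.toNat]
        omega
      · rw [pvTotal_eq (N - 1) 9 (by norm_num) (by omega) (by norm_num [Int.toNat]; omega) (by norm_num [Int.toNat]; omega)]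
        norm_num [Int.toNat]
        omega
    omega
  have eB : pvB_search 0 i i = N :=
    pvB_search_eq i.toNat 0 i i N (by omega) (by omega) (by omega) (by omega) (le_refl i) (by omega) hiN hprev
  simp only [eB, hdN, htN]
  rw [show i - ((N + 1) * 9 - 111111111 + 1 - 9) = (i - 788888890) % 9 from by omega]

lemma pvRegA9 (i : Int) (h1 : 788888890 ≤ i) (h2 : i ≤ 2147483648) :
    digitAtIndex i = pvExtract i 788888890 9 100000000 := by
  have hfd10 : ∀ a : Int, PySem.Int.floordiv a 10 = a / 10 := fun a => PySem.Int.floordiv_eq_ediv_of_pos (by norm_num)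
  have hmd10 : ∀ a : Int, PySem.Int.mod a 10 = a % 10 := fun a => PySem.Int.mod_eq_emod_of_pos (by norm_num)
  have e1 : pvA_loop1 i 1 9 9 = (9, 900000000, 8888888889) := by
    rw [pvA_loop1, if_pos (by norm_num; omega)]; norm_num
    rw [pvA_loop1, if_pos (by norm_num; omega)]; norm_num
    rw [pvA_loop1, if_pos (by norm_num; omega)]; norm_num
    rw [pvA_loop1, if_pos (by norm_num; omega)]; norm_num
    rw [pvA_loop1, if_pos (by norm_num; omega)]; norm_num
    rw [pvA_loop1, if_pos (by norm_num; omega)]; norm_num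
    rw [pvA_loop1, if_pos (by norm_num; omega)]; norm_num
    rw [pvA_loop1, if_pos (by norm_num; omega)]; norm_num
    rw [pvA_loop1, if_neg (by norm_num; omega)]
  have e2 : ((PySem.List.pyRange 1 8 1).foldl
      (fun (st : Int × Int × Int) _ => (st.1 + 1, st.2.1 * 10, st.2.2 + (st.1 + 1) * (st.2.1 * 10)))
      (1, 9, 10)).2.2 = 788888890 := by decide
  unfold digitAtIndex pvExtract
  simp only [if_neg (show ¬ i < 0 by omega), if_neg (show ¬ i < 10 by omega), e1]
  norm_num [show Int.toNat 8 = 8 from rfl]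
  simp only [e2]
  rw [pvA_digits, if_pos (by omega)]; simp only [hfd10, hmd10]
  rw [pvA_digits, if_pos (by omega)]; simp only [hfd10, hmd10]
  rw [pvA_digits, if_pos (by omega)]; simp only [hfd10, hmd10]
  rw [pvA_digits, if_pos (by omega)]; simp only [hfd10, hmd10]
  rw [pvA_digits, if_pos (by omega)]; simp only [hfd10, hmd10]
  rw [pvA_digits, if_pos (by omega)]; simp only [hfd10, hmd10]
  rw [pvA_digits, if_pos (by omega)]; simp only [hfd10, hmd10]
  rw [pvA_digits, if_pos (by omega)]; simp only [hfd10, hmd10]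
  rw [pvA_digits, if_pos (by omega)]; simp only [hfd10, hmd10]
  rw [pvA_digits, if_neg (by omega)]
  simp only [List.nil_append, List.cons_append]
  have hr : (i - 788888890) % 9 = 0 ∨ (i - 788888890) % 9 = 1 ∨ (i - 788888890) % 9 = 2 ∨ (i - 788888890) % 9 = 3 ∨ (i - 788888890) % 9 = 4 ∨ (i - 788888890) % 9 = 5 ∨ (i - 788888890) % 9 = 6 ∨ (i - 788888890) % 9 = 7 ∨ (i - 788888890) % 9 = 8 := by omega
  rcases hr with h|h|h|h|h|h|h|h|h <;> rw [h] <;>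
    norm_num [PySem.List.pyGetD_ofNat', Int.toNat, hfd10, hmd10] <;> omega


-- ===== VERDICT (by name: the statement is the Claim_ definition above) =====
theorem digitAtIndex_spec : Claim_equal_digitAtIndex := by
  intro i hdom
  unfold Spec_digitAtIndex
  have hb : -2147483648 ≤ i ∧ i ≤ 2147483648 := by
    simpa [Dom_digitAtIndex, pvDomInt] using hdom
  by_cases hneg : i < 0
  · simp [digitAtIndex, digitAtIndex_alt, hneg]
  by_cases hsmall : i < 10
  · rw [pvReg1 i (by omega) (by omega)]
    simp [digitAtIndex, hneg, hsmall]
  by_cases c2 : i ≤ 189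
  · rw [pvRegA2 i (by omega) c2, pvRegB2 i (by omega) c2]
  by_cases c3 : i ≤ 2889
  · rw [pvRegA3 i (by omega) c3, pvRegB3 i (by omega) c3]
  by_cases c4 : i ≤ 38889
  · rw [pvRegA4 i (by omega) c4, pvRegB4 i (by omega) c4]
  by_cases c5 : i ≤ 488889
  · rw [pvRegA5 i (by omega) c5, pvRegB5 i (by omega) c5]
  by_cases c6 : i ≤ 5888889
  · rw [pvRegA6 i (by omega) c6, pvRegB6 i (by omega) c6]
  by_cases c7 : i ≤ 68888889
  · rw [pvRegA7 i (by omega) c7, pvRegB7 i (by omega) c7]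
  by_cases c8 : i ≤ 788888889
  · rw [pvRegA8 i (by omega) c8, pvRegB8 i (by omega) c8]
  · rw [pvRegA9 i (by omega) (by omega), pvRegB9 i (by omega) (by omega)]
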